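-- pv_equiv track=rewrite | github.com/Snehareddy0505/dsa | cntnumofnicsubarr.py | cntnumofnicsubarr
-- ===== SOURCE A (Python) =====
-- def cntnumofnicsubarr(nums, goal):
--     if goal < 0:
--         return 0
--
--     l = 0
--     curr_sum = 0
--     cnt = 0
--
--     for r in range(len(nums)):
--         curr_sum += nums[r] % 10
--
--         while curr_sum > goal:
--             curr_sum -= nums[l] % 10
--             l += 1
--
--         cnt += (r - l + 1)
--
--     return cnt
-- ===== SOURCE B (Python) =====
-- def cntnumofnicsubarr(nums, goal):
--     if goal < 0:
--         return 0
--     P = [0]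
--     for x in nums:
--         P.append(P[-1] + x % 10)
--     cnt = 0
--     for r in range(len(nums)):
--         target = P[r + 1] - goal
--         lo, hi = 0, r + 1
--         while lo < hi:
--             mid = (lo + hi) // 2
--             if P[mid] < target:
--                 lo = mid + 1
--             else:
--                 hi = mid
--         cnt += r - lo + 1
--     return cnt
-- ===== Notes on version B (the rewrite author's own statement) =====
-- stated objective: alternative
-- what changed: Replaces A's two-pointer sliding window (carried left pointer and running window sum) by a prefix-sum array with a per-right-endpoint binary search (bisect_left) for the smallest admissible left endpoint, exploiting that digit contributions are nonnegative so prefix sums are monotone.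
import Mathlib
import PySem

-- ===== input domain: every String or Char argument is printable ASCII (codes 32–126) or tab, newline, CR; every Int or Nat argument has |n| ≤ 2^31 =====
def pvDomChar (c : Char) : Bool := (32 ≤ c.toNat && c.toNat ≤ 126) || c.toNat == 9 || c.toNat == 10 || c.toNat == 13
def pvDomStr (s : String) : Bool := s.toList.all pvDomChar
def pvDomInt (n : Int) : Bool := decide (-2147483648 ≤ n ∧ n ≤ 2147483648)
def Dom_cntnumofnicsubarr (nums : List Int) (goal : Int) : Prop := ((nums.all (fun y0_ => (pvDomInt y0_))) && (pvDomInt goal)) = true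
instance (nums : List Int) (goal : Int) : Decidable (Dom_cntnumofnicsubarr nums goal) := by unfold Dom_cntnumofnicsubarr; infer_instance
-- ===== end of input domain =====

-- B replaces A's sliding window by prefix sums + per-endpoint binary search (alternative algorithm, same results).


-- ===== PORT A =====
-- A's inner `while curr_sum > goal` loop; the fuel argument only makes the recursion
-- total (the outer loop always passes enough fuel: the loop runs at most r+1-l times);
-- nums.getD l 0 is exact because l stays in range while the loop runs.
def pvAWhile (nums : List Int) (goal : Int) : Nat → Int → Nat → Int × Nat
  | 0, cs, l => (cs, l)
  | fuel + 1, cs, l =>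
    if goal < cs then
      pvAWhile nums goal fuel (cs - PySem.Int.mod (nums.getD l 0) 10) (l + 1)
    else (cs, l)

-- `for r in range(len(nums))` with state (l, curr_sum, cnt); nums.getD r 0 is exact (r < len).
def cntnumofnicsubarr (nums : List Int) (goal : Int) : Int :=
  if goal < 0 then 0
  else
    ((List.range nums.length).foldl
      (fun (st : Nat × Int × Int) r =>
        let p := pvAWhile nums goal (nums.length + 1) (st.2.1 + PySem.Int.mod (nums.getD r 0) 10) st.1
        (p.2, p.1, st.2.2 + ((r : Int) - (p.2 : Int) + 1)))
      (0, 0, 0)).2.2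

-- ===== PORT B =====
-- `P = [0]; for x in nums: P.append(P[-1] + x % 10)` (P is never empty, so P[-1] is its last slot)
def pvBuildP (nums : List Int) : List Int :=
  nums.foldl (fun P x => P ++ [P.getD (P.length - 1) 0 + PySem.Int.mod x 10]) [0]

-- `while lo < hi: mid = (lo+hi)//2; ...` of Source B; P.getD mid 0 is exact (mid < hi ≤ len P - 1).
def pvBisect (P : List Int) (target : Int) (lo hi : Nat) : Nat :=
  if h : lo < hi then
    if P.getD ((lo + hi) / 2) 0 < target then pvBisect P target ((lo + hi) / 2 + 1) hi
    else pvBisect P target lo ((lo + hi) / 2)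
  else lo
termination_by hi - lo
decreasing_by all_goals omega

def cntnumofnicsubarr_alt (nums : List Int) (goal : Int) : Int :=
  if goal < 0 then 0
  else
    (List.range nums.length).foldl
      (fun (cnt : Int) (r : Nat) =>
        cnt + ((r : Int) - ((pvBisect (pvBuildP nums) ((pvBuildP nums).getD (r + 1) 0 - goal) 0 (r + 1) : Nat) : Int) + 1))
      0

-- ===== PRECONDITION & SPEC =====
def Spec_cntnumofnicsubarr (nums : List Int) (goal : Int) (out : Int) : Prop := out = cntnumofnicsubarr_alt nums goal
instance (nums : List Int) (goal : Int) (out : Int) : Decidable (Spec_cntnumofnicsubarr nums goal out) := by unfold Spec_cntnumofnicsubarr; infer_instance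

-- ===== CLAIM (what is proved, stated in full; the proofs are below) =====
def Claim_equal_cntnumofnicsubarr : Prop := ∀ (nums : List Int) (goal : Int), Dom_cntnumofnicsubarr nums goal → Spec_cntnumofnicsubarr nums goal (cntnumofnicsubarr nums goal)

-- ===== LEMMAS AND PROOFS =====

-- digit-prefix sum: pvPf nums i = sum of (x % 10) over the first i elements
def pvPf (nums : List Int) (i : Nat) : Int :=
  ((nums.take i).map (fun x => PySem.Int.mod x 10)).sum

lemma pvDg_nonneg (x : Int) : 0 ≤ PySem.Int.mod x 10 :=
  PySem.Int.mod_nonneg x (by norm_num)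

lemma pvPf_succ (nums : List Int) (i : Nat) (h : i < nums.length) :
    pvPf nums (i + 1) = pvPf nums i + PySem.Int.mod (nums.getD i 0) 10 := by
  have ht : nums.take (i + 1) = nums.take i ++ [nums[i]] := by
    rw [List.take_add_one, List.getElem?_eq_getElem h]; rfl
  unfold pvPf
  rw [ht, List.map_append, List.sum_append, List.getD_eq_getElem?_getD, List.getElem?_eq_getElem h]
  simp

lemma pvPf_le_succ (nums : List Int) (i : Nat) : pvPf nums i ≤ pvPf nums (i + 1) := by
  by_cases h : i < nums.length
  · rw [pvPf_succ nums i h]; have := pvDg_nonneg (nums.getD i 0); omega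
  · unfold pvPf
    rw [List.take_of_length_le (by omega), List.take_of_length_le (by omega)]

lemma pvPf_mono (nums : List Int) {i j : Nat} (h : i ≤ j) : pvPf nums i ≤ pvPf nums j := by
  induction j with
  | zero => have hi : i = 0 := by omega
            simp [hi]
  | succ j ih =>
    rcases Nat.lt_or_ge i (j + 1) with hl | hl
    · exact le_trans (ih (by omega)) (pvPf_le_succ nums j)
    · have : i = j + 1 := by omega
      simp [this]

-- the scan of Source B's loop
def pvScan (s : Int) : List Int → List Int
  | [] => []
  | x :: xs => (s + PySem.Int.mod x 10) :: pvScan (s + PySem.Int.mod x 10) xs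

lemma pvFold_eq : ∀ (xs P : List Int) (s : Int), P ≠ [] → P.getD (P.length - 1) 0 = s →
    xs.foldl (fun P x => P ++ [P.getD (P.length - 1) 0 + PySem.Int.mod x 10]) P = P ++ pvScan s xs := by
  intro xs
  induction xs with
  | nil => intro P s _ _; simp [pvScan]
  | cons x xs ih =>
    intro P s hne hlast
    simp only [List.foldl_cons, pvScan]
    rw [hlast]
    rw [ih (P ++ [s + PySem.Int.mod x 10]) (s + PySem.Int.mod x 10) (by simp) ?_]
    · simp
    · simp [List.getD_eq_getElem?_getD]

lemma pvScan_getD : ∀ (xs : List Int) (s : Int) (i : Nat), i < xs.length →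
    (pvScan s xs).getD i 0 = s + pvPf xs (i + 1) := by
  intro xs
  induction xs with
  | nil => intro s i h; simp at h
  | cons x xs ih =>
    intro s i h
    cases i with
    | zero => simp [pvScan, pvPf]
    | succ i =>
      simp only [pvScan, List.getD_cons_succ]
      rw [ih (s + PySem.Int.mod x 10) i (by simpa using h)]
      unfold pvPf
      simp only [List.take_succ_cons, List.map_cons, List.sum_cons]
      ring

lemma pvBuildP_getD (nums : List Int) (i : Nat) (h : i ≤ nums.length) :
    (pvBuildP nums).getD i 0 = pvPf nums i := by
  unfold pvBuildP
  rw [pvFold_eq nums [0] 0 (by simp) (by simp)]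
  cases i with
  | zero => simp [pvPf]
  | succ i =>
    simp only [List.cons_append, List.nil_append, List.getD_cons_succ]
    rw [pvScan_getD nums 0 i (by omega)]
    omega

lemma pvLeast_unique (nums : List Int) (t : Int) (a b : Nat)
    (ha1 : ∀ j, j < a → pvPf nums j < t) (ha2 : t ≤ pvPf nums a)
    (hb1 : ∀ j, j < b → pvPf nums j < t) (hb2 : t ≤ pvPf nums b) : a = b := by
  rcases lt_trichotomy a b with h | h | h
  · have := hb1 a h; omega
  · exact h
  · have := ha1 b h; omega

lemma pvBisect_spec (nums : List Int) (t : Int) :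
    ∀ (k lo hi : Nat), hi - lo ≤ k → lo ≤ hi → hi ≤ nums.length →
      (∀ j, j < lo → pvPf nums j < t) → t ≤ pvPf nums hi →
      (∀ j, j < pvBisect (pvBuildP nums) t lo hi → pvPf nums j < t) ∧
      t ≤ pvPf nums (pvBisect (pvBuildP nums) t lo hi) ∧
      pvBisect (pvBuildP nums) t lo hi ≤ nums.length := by
  intro k
  induction k with
  | zero =>
    intro lo hi hk hle hhi hlo ht
    have : lo = hi := by omega
    rw [pvBisect]
    simp only [this, lt_irrefl, dif_neg, not_false_iff]
    subst this
    exact ⟨hlo, ht, hhi⟩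
  | succ k ih =>
    intro lo hi hk hle hhi hlo ht
    rw [pvBisect]
    by_cases h : lo < hi
    · rw [dif_pos h]
      have hmid1 : lo ≤ (lo + hi) / 2 := by omega
      have hmid2 : (lo + hi) / 2 < hi := by omega
      rw [pvBuildP_getD nums ((lo + hi) / 2) (by omega)]
      by_cases hc : pvPf nums ((lo + hi) / 2) < t
      · rw [if_pos hc]
        refine ih ((lo + hi) / 2 + 1) hi (by omega) (by omega) hhi ?_ ht
        intro j hj
        exact lt_of_le_of_lt (pvPf_mono nums (by omega)) hc
      · rw [if_neg hc]
        exact ih lo ((lo + hi) / 2) (by omega) (by omega) (by omega) hlo (by omega)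
    · rw [dif_neg h]
      have : lo = hi := by omega
      subst this
      exact ⟨hlo, ht, hhi⟩

lemma pvAWhile_spec (nums : List Int) (goal : Int) (hg : 0 ≤ goal) (r : Nat) (hr : r < nums.length) :
    ∀ (fuel : Nat) (cs : Int) (l : Nat), cs = pvPf nums (r + 1) - pvPf nums l → l ≤ r + 1 →
      (∀ j, j < l → goal < pvPf nums (r + 1) - pvPf nums j) → r + 1 - l < fuel →
      (pvAWhile nums goal fuel cs l).1 = pvPf nums (r + 1) - pvPf nums (pvAWhile nums goal fuel cs l).2 ∧
      (pvAWhile nums goal fuel cs l).2 ≤ r + 1 ∧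
      (pvAWhile nums goal fuel cs l).1 ≤ goal ∧
      (∀ j, j < (pvAWhile nums goal fuel cs l).2 → goal < pvPf nums (r + 1) - pvPf nums j) := by
  intro fuel
  induction fuel with
  | zero => intro cs l _ _ _ hf; omega
  | succ fuel ih =>
    intro cs l hcs hl hmin hf
    rw [pvAWhile]
    by_cases h : goal < cs
    · rw [if_pos h]
      have hlr : l ≠ r + 1 := by
        intro he; subst he; simp at hcs; omega
      have hl' : l < nums.length := by omega
      have hstep : cs - PySem.Int.mod (nums.getD l 0) 10 = pvPf nums (r + 1) - pvPf nums (l + 1) := by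
        rw [pvPf_succ nums l hl']; omega
      refine ih _ (l + 1) hstep (by omega) ?_ (by omega)
      intro j hj
      rcases Nat.lt_or_ge j l with hj' | hj'
      · exact hmin j hj'
      · have : j = l := by omega
        subst this; omega
    · rw [if_neg h]
      exact ⟨hcs, hl, by omega, hmin⟩

lemma pvOuter (nums : List Int) (goal : Int) (hg : 0 ≤ goal) :
    ∀ (m : Nat), m ≤ nums.length →
      (((List.range m).foldl
        (fun (st : Nat × Int × Int) r =>
          let p := pvAWhile nums goal (nums.length + 1) (st.2.1 + PySem.Int.mod (nums.getD r 0) 10) st.1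
          (p.2, p.1, st.2.2 + ((r : Int) - (p.2 : Int) + 1)))
        (0, 0, 0)).2.1 =
        pvPf nums m - pvPf nums ((List.range m).foldl
        (fun (st : Nat × Int × Int) r =>
          let p := pvAWhile nums goal (nums.length + 1) (st.2.1 + PySem.Int.mod (nums.getD r 0) 10) st.1
          (p.2, p.1, st.2.2 + ((r : Int) - (p.2 : Int) + 1)))
        (0, 0, 0)).1) ∧
      ((List.range m).foldl
        (fun (st : Nat × Int × Int) r =>
          let p := pvAWhile nums goal (nums.length + 1) (st.2.1 + PySem.Int.mod (nums.getD r 0) 10) st.1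
          (p.2, p.1, st.2.2 + ((r : Int) - (p.2 : Int) + 1)))
        (0, 0, 0)).1 ≤ m ∧
      (∀ j, j < ((List.range m).foldl
        (fun (st : Nat × Int × Int) r =>
          let p := pvAWhile nums goal (nums.length + 1) (st.2.1 + PySem.Int.mod (nums.getD r 0) 10) st.1
          (p.2, p.1, st.2.2 + ((r : Int) - (p.2 : Int) + 1)))
        (0, 0, 0)).1 → goal < pvPf nums m - pvPf nums j) ∧
      ((List.range m).foldl
        (fun (st : Nat × Int × Int) r =>
          let p := pvAWhile nums goal (nums.length + 1) (st.2.1 + PySem.Int.mod (nums.getD r 0) 10) st.1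
          (p.2, p.1, st.2.2 + ((r : Int) - (p.2 : Int) + 1)))
        (0, 0, 0)).2.2 =
      (List.range m).foldl
        (fun (cnt : Int) (r : Nat) =>
          cnt + ((r : Int) - ((pvBisect (pvBuildP nums) ((pvBuildP nums).getD (r + 1) 0 - goal) 0 (r + 1) : Nat) : Int) + 1))
        0 := by
  intro m
  induction m with
  | zero => simp [pvPf]
  | succ m ih =>
    intro hm
    obtain ⟨ih1, ih2, ih3, ih4⟩ := ih (by omega)
    have hmn : m < nums.length := by omega
    rw [List.range_succ, List.foldl_append, List.foldl_append]
    simp only [List.foldl_cons, List.foldl_nil]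
    set stA := (List.range m).foldl
        (fun (st : Nat × Int × Int) r =>
          let p := pvAWhile nums goal (nums.length + 1) (st.2.1 + PySem.Int.mod (nums.getD r 0) 10) st.1
          (p.2, p.1, st.2.2 + ((r : Int) - (p.2 : Int) + 1)))
        (0, 0, 0) with hstA
    have hcs : stA.2.1 + PySem.Int.mod (nums.getD m 0) 10 = pvPf nums (m + 1) - pvPf nums stA.1 := by
      rw [ih1, pvPf_succ nums m hmn]; ring
    have hmin : ∀ j, j < stA.1 → goal < pvPf nums (m + 1) - pvPf nums j := by
      intro j hj
      have := ih3 j hj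
      have := pvPf_le_succ nums m
      omega
    obtain ⟨hw1, hw2, hw3, hw4⟩ :=
      pvAWhile_spec nums goal hg m hmn (nums.length + 1)
        (stA.2.1 + PySem.Int.mod (nums.getD m 0) 10) stA.1 hcs (by omega) hmin (by omega)
    set p := pvAWhile nums goal (nums.length + 1) (stA.2.1 + PySem.Int.mod (nums.getD m 0) 10) stA.1 with hp
    -- B side: bisect finds the same least index
    have hP1 : (pvBuildP nums).getD (m + 1) 0 = pvPf nums (m + 1) := pvBuildP_getD nums (m + 1) (by omega)
    obtain ⟨hb1, hb2, hb3⟩ :=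
      pvBisect_spec nums (pvPf nums (m + 1) - goal) (m + 1) 0 (m + 1) (by omega) (by omega)
        (by omega) (by intro j hj; omega) (by omega)
    have heq : pvBisect (pvBuildP nums) ((pvBuildP nums).getD (m + 1) 0 - goal) 0 (m + 1) = p.2 := by
      rw [hP1]
      refine pvLeast_unique nums (pvPf nums (m + 1) - goal) _ p.2 hb1 (by omega) ?_ (by omega)
      intro j hj
      have := hw4 j hj
      omega
    refine ⟨by simpa using hw1, by simpa using hw2, by simpa using hw4, ?_⟩
    show stA.2.2 + ((m : Int) - (p.2 : Int) + 1) =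
      (List.range m).foldl
        (fun (cnt : Int) (r : Nat) =>
          cnt + ((r : Int) - ((pvBisect (pvBuildP nums) ((pvBuildP nums).getD (r + 1) 0 - goal) 0 (r + 1) : Nat) : Int) + 1)) 0
      + ((m : Int) - ((pvBisect (pvBuildP nums) ((pvBuildP nums).getD (m + 1) 0 - goal) 0 (m + 1) : Nat) : Int) + 1)
    rw [ih4, heq]

lemma pvMain (nums : List Int) (goal : Int) :
    cntnumofnicsubarr nums goal = cntnumofnicsubarr_alt nums goal := by
  unfold cntnumofnicsubarr cntnumofnicsubarr_alt
  by_cases h : goal < 0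
  · simp [h]
  · rw [if_neg h, if_neg h]
    exact (pvOuter nums goal (by omega) nums.length (le_refl _)).2.2.2

-- ===== VERDICT (by name: the statement is the Claim_ definition above) =====
theorem cntnumofnicsubarr_spec : Claim_equal_cntnumofnicsubarr := by
  intro nums goal _
  unfold Spec_cntnumofnicsubarr
  exact pvMain nums goal
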